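-- pv_equiv track=rewrite | github.com/pret/pokefirered | .github/agents-meta/add_gen23_pokemon.py | get_moves_at_level
-- ===== SOURCE A (Python) =====
-- def get_moves_at_level(species_name, level, learnsets):
--     """Get the top 4 moves a species would know at a given level."""
--     # Convert SPECIES_LILEEP -> lileep
--     name_key = species_name.replace("SPECIES_", "").lower()
--
--     if name_key not in learnsets:
--         return ["MOVE_NONE"] * 4
--
--     # Get all moves learned at or below this level
--     available = []
--     for lvl, move in learnsets[name_key]:
--         if lvl <= level:
--             # Remove duplicates, keep latest learned version
--             if move not in available:
--                 available.append(move)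
--             else:
--                 # Move it to the end (most recent)
--                 available.remove(move)
--                 available.append(move)
--
--     # Take the last 4 (most recently learned)
--     moves = available[-4:] if len(available) >= 4 else available
--
--     # Pad with MOVE_NONE
--     while len(moves) < 4:
--         moves.append("MOVE_NONE")
--
--     return moves
-- ===== SOURCE B (Python) =====
-- def get_moves_at_level(species_name, level, learnsets):
--     """Get the top 4 moves a species would know at a given level."""
--     name_key = species_name.replace("SPECIES_", "").lower()
--
--     if name_key not in learnsets:
--         return ["MOVE_NONE"] * 4
--
--     # Scan the learnset backwards: the first time we see a move (at or below
--     # the level) in this direction is its most recent learning. Stop at 4.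
--     seen = set()
--     picked = []
--     for lvl, move in reversed(learnsets[name_key]):
--         if lvl <= level and move not in seen:
--             seen.add(move)
--             picked.append(move)
--             if len(picked) == 4:
--                 break
--
--     # Restore ascending last-learned order and pad.
--     moves = picked[::-1]
--     return moves + ["MOVE_NONE"] * (4 - len(moves))
-- ===== Notes on version B (the rewrite author's own statement) =====
-- stated objective: alternative
-- what changed: B scans the learnset in reverse with a seen-set, collecting each move's first reverse-appearance and stopping as soon as 4 moves are found, then reverses and pads, instead of A's forward move-to-end deduplication (with repeated membership tests and list.remove) followed by a [-4:] slice.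
import Mathlib
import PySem

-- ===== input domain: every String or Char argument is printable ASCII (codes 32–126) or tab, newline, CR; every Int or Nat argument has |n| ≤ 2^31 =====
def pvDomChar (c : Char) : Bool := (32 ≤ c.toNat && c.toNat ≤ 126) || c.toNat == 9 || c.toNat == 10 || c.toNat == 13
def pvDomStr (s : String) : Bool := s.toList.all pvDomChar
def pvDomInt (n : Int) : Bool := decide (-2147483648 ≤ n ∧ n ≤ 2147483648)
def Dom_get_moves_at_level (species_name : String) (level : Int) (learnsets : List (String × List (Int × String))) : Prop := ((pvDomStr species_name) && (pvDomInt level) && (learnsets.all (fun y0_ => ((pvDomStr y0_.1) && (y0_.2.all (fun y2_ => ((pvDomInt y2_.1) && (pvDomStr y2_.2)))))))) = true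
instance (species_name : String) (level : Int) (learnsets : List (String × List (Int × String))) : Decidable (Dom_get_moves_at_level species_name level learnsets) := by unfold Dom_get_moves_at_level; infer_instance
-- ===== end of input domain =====

-- B replaces A's forward move-to-end deduplication plus tail slice by a reverse scan with a
-- seen-set that stops after 4 first-in-reverse (= most recently learned) moves; objective: alternative.

-- ===== PORT A =====
-- while len(moves) < 4: moves.append("MOVE_NONE")
def pvPadA (ms : List String) : List String :=
  if ms.length < 4 then pvPadA (ms ++ ["MOVE_NONE"]) else ms
  termination_by 4 - ms.length
  decreasing_by simp; omega

def get_moves_at_level (species_name : String) (level : Int) (learnsets : List (String × List (Int × String))) : List String :=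
  let name_key := PySem.Str.lower (PySem.Str.replace species_name "SPECIES_" "")
  -- 'name_key not in learnsets' / 'learnsets[name_key]': first-match association-list lookup
  match learnsets.lookup name_key with
  | none => List.replicate 4 "MOVE_NONE"
  | some entries =>
    let available := entries.foldl (fun acc p =>
      if p.1 ≤ level then
        if acc.contains p.2 then
          -- available.remove(move); available.append(move): the guard gives p.2 ∈ acc, where
          -- Python's list.remove is exactly List.erase (PySem.List.remove?_eq_some_erase)
          acc.erase p.2 ++ [p.2]
        else acc ++ [p.2]
      else acc) []
    let moves := if 4 ≤ available.length
      then PySem.List.slice available (some (-4)) none   -- available[-4:]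
      else available
    pvPadA moves

-- ===== PORT B =====
-- the backwards scan: stop as soon as 4 moves are picked
def pvAltScan (level : Int) : List (Int × String) → PySem.Set String → List String → List String
  | [], _, picked => picked
  | p :: rest, seen, picked =>
    if p.1 ≤ level ∧ PySem.Set.contains seen p.2 = false then
      if (picked ++ [p.2]).length = 4 then picked ++ [p.2]
      else pvAltScan level rest (PySem.Set.add seen p.2) (picked ++ [p.2])
    else pvAltScan level rest seen picked

def get_moves_at_level_alt (species_name : String) (level : Int) (learnsets : List (String × List (Int × String))) : List String :=
  let name_key := PySem.Str.lower (PySem.Str.replace species_name "SPECIES_" "")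
  match learnsets.lookup name_key with
  | none => List.replicate 4 "MOVE_NONE"
  | some entries =>
    let moves := (pvAltScan level entries.reverse PySem.Set.empty []).reverse  -- picked[::-1]
    moves ++ List.replicate (4 - moves.length) "MOVE_NONE"

-- ===== PRECONDITION & SPEC =====
def Spec_get_moves_at_level (species_name : String) (level : Int) (learnsets : List (String × List (Int × String))) (out : List String) : Prop := out = get_moves_at_level_alt species_name level learnsets
instance (species_name : String) (level : Int) (learnsets : List (String × List (Int × String))) (out : List String) : Decidable (Spec_get_moves_at_level species_name level learnsets out) := by unfold Spec_get_moves_at_level; infer_instance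

-- ===== CLAIM (what is proved, stated in full; the proofs are below) =====
def Claim_equal_get_moves_at_level : Prop := ∀ (species_name : String) (level : Int) (learnsets : List (String × List (Int × String))), Dom_get_moves_at_level species_name level learnsets → Spec_get_moves_at_level species_name level learnsets (get_moves_at_level species_name level learnsets)

-- ===== LEMMAS AND PROOFS =====

-- the moves learned at or below `level`, in learnset order
def pvFs (level : Int) (l : List (Int × String)) : List String :=
  l.filterMap (fun p => if p.1 ≤ level then some p.2 else none)

-- A's dedup step, on the move list alone
def pvMstep (acc : List String) (m : String) : List String :=
  if acc.contains m then acc.erase m ++ [m] else acc ++ [m]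

-- first-occurrence dedup
def pvDfirst : List String → List String
  | [] => []
  | m :: r => m :: (pvDfirst r).filter (fun x => x != m)

theorem pvFoldA_eq (level : Int) (l : List (Int × String)) (acc : List String) :
    l.foldl (fun acc p =>
      if p.1 ≤ level then
        if acc.contains p.2 then acc.erase p.2 ++ [p.2] else acc ++ [p.2]
      else acc) acc = (pvFs level l).foldl pvMstep acc := by
  induction l generalizing acc with
  | nil => rfl
  | cons p rest ih =>
    rw [List.foldl_cons, ih]
    simp only [pvFs, List.filterMap_cons]
    by_cases h : p.1 ≤ level
    · simp [h, pvMstep]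
    · simp [h]

theorem pvMstep_nodup {acc : List String} (h : acc.Nodup) (m : String) : (pvMstep acc m).Nodup := by
  unfold pvMstep
  by_cases hm : acc.contains m
  · rw [if_pos hm, List.nodup_append_comm]
    simp only [List.singleton_append, List.nodup_cons]
    exact ⟨fun hx => ((h.mem_erase_iff).mp hx).1 rfl, h.erase m⟩
  · rw [if_neg hm, List.nodup_append_comm]
    have hm' : m ∉ acc := by simpa [List.contains_eq_mem] using hm
    simp [hm', h]

theorem pvDfirst_nodup (l : List String) : l.Nodup → pvDfirst l = l := by
  induction l with
  | nil => intro; rfl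
  | cons m r ih =>
    intro h
    rcases List.nodup_cons.mp h with ⟨hm, hr⟩
    simp only [pvDfirst, ih hr]
    rw [List.filter_eq_self.mpr]
    intro x hx
    simp only [bne_iff_ne, ne_eq]
    exact fun he => hm (he ▸ hx)

theorem pvDfirst_append (xs u : List String) :
    pvDfirst (xs ++ u) = pvDfirst xs ++ (pvDfirst u).filter (fun x => !(xs.contains x)) := by
  induction xs with
  | nil => simp [pvDfirst]
  | cons a xs ih =>
    simp only [List.cons_append, pvDfirst, ih, List.filter_append, List.filter_filter]
    congr 1
    congr 1
    apply List.filter_congr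
    intro x _
    by_cases hx : x = a <;> simp [hx]

theorem pvDfirst_filter (p : String → Bool) (l : List String) :
    pvDfirst (l.filter p) = (pvDfirst l).filter p := by
  induction l with
  | nil => rfl
  | cons a l ih =>
    by_cases ha : p a = true
    · simp only [List.filter_cons, ha, if_pos, pvDfirst, ih, List.filter_filter]
      congr 1
      apply List.filter_congr
      intro x _
      by_cases hx : x = a <;> simp [hx, ha, Bool.and_comm]
    · have ha' : p a = false := by simpa using ha
      simp only [List.filter_cons, ha', Bool.false_eq_true, if_false, pvDfirst, ih,
        List.filter_filter]
      apply List.filter_congr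
      intro x _
      by_cases hx : x = a <;> simp [hx, ha']

theorem pvFold_reverse (l : List String) (acc : List String) (h : acc.Nodup) :
    (l.foldl pvMstep acc).reverse = pvDfirst (l.reverse ++ acc.reverse) := by
  induction l generalizing acc with
  | nil =>
    simp only [List.foldl_nil, List.reverse_nil, List.nil_append]
    exact (pvDfirst_nodup _ (List.nodup_reverse.mpr h)).symm
  | cons m rest ih =>
    have key : pvDfirst ((pvMstep acc m).reverse) = pvDfirst ([m] ++ acc.reverse) := by
      unfold pvMstep
      by_cases hm : m ∈ acc
      · rw [if_pos (by simpa [List.contains_eq_mem] using hm)]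
        simp only [List.reverse_append, List.reverse_cons, List.reverse_nil, List.nil_append,
          List.singleton_append, pvDfirst]
        congr 1
        rw [pvDfirst_nodup _ (List.nodup_reverse.mpr (h.erase m)),
          pvDfirst_nodup _ (List.nodup_reverse.mpr h),
          h.erase_eq_filter m, ← List.filter_reverse, List.filter_filter]
        apply List.filter_congr
        intro x _
        cases hx : x != m <;> simp
      · rw [if_neg (by simpa [List.contains_eq_mem] using hm)]
        simp
    rw [List.foldl_cons, ih _ (pvMstep_nodup h m), List.reverse_cons, List.append_assoc,
      pvDfirst_append, pvDfirst_append, key]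

-- B's scan, characterised: picks the first-seen prefix of the deduped remaining moves
theorem pvAltScan_spec (level : Int) (l : List (Int × String)) (seen : PySem.Set String)
    (picked : List String) (hlen : picked.length < 4)
    (hseen : ∀ m, PySem.Set.contains seen m = true ↔ m ∈ picked) :
    pvAltScan level l seen picked =
      picked ++ (pvDfirst ((pvFs level l).filter (fun m => !(picked.contains m)))).take (4 - picked.length) := by
  induction l generalizing seen picked with
  | nil => simp [pvAltScan, pvFs, pvDfirst]
  | cons p rest ih =>
    by_cases hl : p.1 ≤ level
    · by_cases hs : PySem.Set.contains seen p.2 = false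
      · have hnp : p.2 ∉ picked := fun hmem => by
          have hc := (hseen p.2).mpr hmem
          rw [hs] at hc
          exact Bool.false_ne_true hc
        have hpk : picked.contains p.2 = false := by simp [List.contains_eq_mem, hnp]
        have hfs : pvFs level (p :: rest) = p.2 :: pvFs level rest := by simp [pvFs, hl]
        simp only [pvAltScan]
        rw [if_pos ⟨hl, hs⟩, hfs,
          show (p.2 :: pvFs level rest).filter (fun m => !(picked.contains m))
              = p.2 :: (pvFs level rest).filter (fun m => !(picked.contains m)) from by
            simp [hnp]]
        by_cases h4 : (picked ++ [p.2]).length = 4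
        · rw [if_pos h4]
          have h1 : 4 - picked.length = 1 := by
            simp only [List.length_append, List.length_cons, List.length_nil] at h4; omega
          rw [h1]
          simp [pvDfirst]
        · rw [if_neg h4]
          have hlen' : (picked ++ [p.2]).length < 4 := by
            simp only [List.length_append, List.length_cons, List.length_nil] at h4 ⊢; omega
          have hseen' : ∀ m, PySem.Set.contains (PySem.Set.add seen p.2) m = true ↔ m ∈ picked ++ [p.2] := by
            intro m
            rw [PySem.Set.contains_iff, PySem.Set.mem_add, List.mem_append, List.mem_singleton,
              ← PySem.Set.contains_iff, hseen m]
          have harith : 4 - picked.length = (4 - (picked ++ [p.2]).length) + 1 := by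
            simp only [List.length_append, List.length_cons, List.length_nil] at h4 ⊢; omega
          have hflt : (pvFs level rest).filter (fun m => !((picked ++ [p.2]).contains m))
              = ((pvFs level rest).filter (fun m => !(picked.contains m))).filter (fun x => x != p.2) := by
            rw [List.filter_filter]
            apply List.filter_congr
            intro x _
            by_cases hx : x = p.2 <;> simp [hx, List.contains_eq_mem]
          rw [ih _ _ hlen' hseen', hflt, pvDfirst_filter]
          simp only [pvDfirst, harith, List.take_succ_cons, List.append_assoc,
            List.singleton_append]
      · have hs' : PySem.Set.contains seen p.2 = true := by
          cases hc : PySem.Set.contains seen p.2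
          · exact absurd hc hs
          · rfl
        have hmem : p.2 ∈ picked := (hseen p.2).mp hs'
        have hfs : pvFs level (p :: rest) = p.2 :: pvFs level rest := by simp [pvFs, hl]
        simp only [pvAltScan]
        rw [if_neg (fun hc => by rw [hc.2] at hs'; exact Bool.false_ne_true hs')]
        rw [ih _ _ hlen hseen]
        try rw [hfs, List.filter_cons, if_neg (by simp [List.contains_eq_mem, hmem])]
    · have hfs : pvFs level (p :: rest) = pvFs level rest := by simp [pvFs, hl]
      simp only [pvAltScan]
      rw [if_neg (fun hc => hl hc.1)]
      rw [ih _ _ hlen hseen]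
      try rw [hfs]

theorem pvPadA_eq (ms : List String) :
    pvPadA ms = ms ++ List.replicate (4 - ms.length) "MOVE_NONE" := by
  by_cases h : ms.length < 4
  · rw [pvPadA, if_pos h, pvPadA_eq (ms ++ ["MOVE_NONE"])]
    have : 4 - ms.length = (4 - (ms ++ ["MOVE_NONE"]).length) + 1 := by simp; omega
    rw [this, List.append_assoc]
    simp [List.replicate_succ]
  · rw [pvPadA, if_neg h]
    have : 4 - ms.length = 0 := by omega
    simp [this]
  termination_by 4 - ms.length
  decreasing_by simp; omega

theorem pvDropTakeRev (l : List String) : l.drop (l.length - 4) = (l.reverse.take 4).reverse := by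
  rw [List.take_reverse, List.reverse_reverse]

theorem pvFsReverse (level : Int) (l : List (Int × String)) :
    pvFs level l.reverse = (pvFs level l).reverse := by
  simp [pvFs, List.filterMap_reverse]

-- ===== VERDICT (by name: the statement is the Claim_ definition above) =====
theorem get_moves_at_level_spec : Claim_equal_get_moves_at_level := by
  intro species_name level learnsets _
  unfold Spec_get_moves_at_level get_moves_at_level get_moves_at_level_alt
  dsimp only
  cases hlk : learnsets.lookup (PySem.Str.lower (PySem.Str.replace species_name "SPECIES_" "")) with
  | none => rfl
  | some entries =>
    dsimp only
    rw [pvFoldA_eq]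
    have hrev : (List.foldl pvMstep [] (pvFs level entries)).reverse
        = pvDfirst (pvFs level entries).reverse := by
      rw [pvFold_reverse _ [] List.nodup_nil]; simp
    rw [pvAltScan_spec level entries.reverse PySem.Set.empty [] (by simp)
      (fun m => by simp [PySem.Set.empty])]
    simp only [List.nil_append, List.length_nil, Nat.sub_zero]
    have hfilt : (pvFs level entries.reverse).filter (fun m => !(List.contains ([] : List String) m))
        = (pvFs level entries).reverse := by
      rw [pvFsReverse]; simp
    rw [hfilt, ← hrev]
    have hmoves : (if 4 ≤ (List.foldl pvMstep [] (pvFs level entries)).length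
        then PySem.List.slice (List.foldl pvMstep [] (pvFs level entries)) (some (-4)) none
        else List.foldl pvMstep [] (pvFs level entries))
        = ((List.foldl pvMstep [] (pvFs level entries)).reverse.take 4).reverse := by
      by_cases h4 : 4 ≤ (List.foldl pvMstep [] (pvFs level entries)).length
      · rw [if_pos h4, PySem.List.slice_from_neg_ofNat _ 4 (by norm_num), pvDropTakeRev]
      · rw [if_neg h4]
        rw [List.take_of_length_le (by simp; omega), List.reverse_reverse]
    rw [hmoves, pvPadA_eq]
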